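-- pv_equiv track=rewrite | github.com/44r0nqtp2t43vr/FreeAI | modules/validators.py | validate_L2_21
-- ===== SOURCE A (Python) =====
-- def validate_L2_21(statement_type, tags_list):
--     varname_indices = [index for index in range(len(tags_list)) if tags_list[index][1] == 'var_name']
--     equals_indices = [index for index in range(len(tags_list)) if tags_list[index][1] == '=']
--     number_indices = [index for index in range(len(tags_list)) if tags_list[index][1] == 'number']
--     function_indices = [index for index in range(len(tags_list)) if tags_list[index][1] == 'function_name']
--     if_indices = [index for index in range(len(tags_list)) if tags_list[index][1] == 'if']
--     else_indices = [index for index in range(len(tags_list)) if tags_list[index][1] == 'else']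
--     if statement_type == 'conditional' and (len(equals_indices) == 4 and (len(varname_indices) == 2 and (len(number_indices) == 2 and (len(function_indices) == 3 and (len(if_indices) == 2 and len(else_indices) == 2))))):
--         if (equals_indices[1] - equals_indices[0] != 1) or (equals_indices[3] - equals_indices[2] != 1):
--             return False
--         if tags_list[number_indices[0]][0] != '70' or tags_list[number_indices[1]][0] != '421':
--             return False
--         if tags_list[varname_indices[0]][0] != 'turn' or tags_list[varname_indices[1]][0] != 'turn':
--             return False
--         if tags_list[function_indices[0]][0] != 'usefiroid' or tags_list[function_indices[1]][0] != 'usewateroid' or tags_list[function_indices[2]][0] != 'useelectroid':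
--             return False
--         if if_indices[1] - else_indices[0] != 1:
--             return False
--         return True
--     return False
-- ===== SOURCE B (Python) =====
-- def validate_L2_21(statement_type, tags_list):
--     equals_indices, if_indices, else_indices = [], [], []
--     numbers, varnames, functions = [], [], []
--     for index, (value, tag) in enumerate(tags_list):
--         if tag == '=':
--             equals_indices.append(index)
--         elif tag == 'if':
--             if_indices.append(index)
--         elif tag == 'else':
--             else_indices.append(index)
--         elif tag == 'number':
--             numbers.append(value)
--         elif tag == 'var_name':
--             varnames.append(value)
--         elif tag == 'function_name':
--             functions.append(value)
--     return (statement_type == 'conditional'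
--             and len(equals_indices) == 4
--             and equals_indices[1] - equals_indices[0] == 1
--             and equals_indices[3] - equals_indices[2] == 1
--             and numbers == ['70', '421']
--             and varnames == ['turn', 'turn']
--             and functions == ['usefiroid', 'usewateroid', 'useelectroid']
--             and len(if_indices) == 2
--             and len(else_indices) == 2
--             and if_indices[1] - else_indices[0] == 1)
-- ===== Notes on version B (the rewrite author's own statement) =====
-- stated objective: simpler
-- what changed: Replaces A's six separate index-comprehension passes over range(len) with one enumerate pass that buckets indices (for '=', 'if', 'else') and values (for 'number', 'var_name', 'function_name'), and collapses A's guarded early-return chain into a single conjunction comparing the collected value lists against literal lists.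
import Mathlib
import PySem

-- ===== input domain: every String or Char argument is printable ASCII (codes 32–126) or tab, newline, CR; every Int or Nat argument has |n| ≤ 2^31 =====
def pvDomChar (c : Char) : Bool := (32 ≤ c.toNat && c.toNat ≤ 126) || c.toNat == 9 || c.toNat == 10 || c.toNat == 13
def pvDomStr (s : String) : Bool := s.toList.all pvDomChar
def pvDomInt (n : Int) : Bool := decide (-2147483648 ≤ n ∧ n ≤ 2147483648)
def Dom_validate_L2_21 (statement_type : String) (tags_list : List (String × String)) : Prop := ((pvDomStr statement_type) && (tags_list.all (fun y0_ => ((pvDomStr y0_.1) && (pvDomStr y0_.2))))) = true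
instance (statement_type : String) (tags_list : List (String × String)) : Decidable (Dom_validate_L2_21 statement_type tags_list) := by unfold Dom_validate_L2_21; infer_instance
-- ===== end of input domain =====

-- B replaces A's six index-comprehension passes by one enumerate pass bucketing indices/values; objective: simpler.
-- ===== PORT A =====
-- the comprehension '[index for index in range(len(tags_list)) if tags_list[index][1] == t]'
-- (index always in range, so pyGetD with a dummy default is exact)
def pvIdxA (tags_list : List (String × String)) (t : String) : List Int :=
  (PySem.List.pyRange 0 (PySem.List.len tags_list) 1).filter
    (fun index => (PySem.List.pyGetD tags_list index ("", "")).2 == t)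

def validate_L2_21 (statement_type : String) (tags_list : List (String × String)) : Bool :=
  let varname_indices := pvIdxA tags_list "var_name"
  let equals_indices := pvIdxA tags_list "="
  let number_indices := pvIdxA tags_list "number"
  let function_indices := pvIdxA tags_list "function_name"
  let if_indices := pvIdxA tags_list "if"
  let else_indices := pvIdxA tags_list "else"
  if statement_type == "conditional" && (equals_indices.length == 4 && (varname_indices.length == 2 &&
      (number_indices.length == 2 && (function_indices.length == 3 &&
      (if_indices.length == 2 && else_indices.length == 2))))) then
    if (PySem.List.pyGetD equals_indices 1 0 - PySem.List.pyGetD equals_indices 0 0 != 1) ||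
       (PySem.List.pyGetD equals_indices 3 0 - PySem.List.pyGetD equals_indices 2 0 != 1) then false
    else if (PySem.List.pyGetD tags_list (PySem.List.pyGetD number_indices 0 0) ("", "")).1 != "70" ||
            (PySem.List.pyGetD tags_list (PySem.List.pyGetD number_indices 1 0) ("", "")).1 != "421" then false
    else if (PySem.List.pyGetD tags_list (PySem.List.pyGetD varname_indices 0 0) ("", "")).1 != "turn" ||
            (PySem.List.pyGetD tags_list (PySem.List.pyGetD varname_indices 1 0) ("", "")).1 != "turn" then false
    else if (PySem.List.pyGetD tags_list (PySem.List.pyGetD function_indices 0 0) ("", "")).1 != "usefiroid" ||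
            (PySem.List.pyGetD tags_list (PySem.List.pyGetD function_indices 1 0) ("", "")).1 != "usewateroid" ||
            (PySem.List.pyGetD tags_list (PySem.List.pyGetD function_indices 2 0) ("", "")).1 != "useelectroid" then false
    else if PySem.List.pyGetD if_indices 1 0 - PySem.List.pyGetD else_indices 0 0 != 1 then false
    else true
  else false

-- ===== PORT B =====
structure PvBuckets where
  eqs : List Int
  ifs : List Int
  elses : List Int
  nums : List String
  vars : List String
  funs : List String
deriving Repr

def pvStep (s : PvBuckets) (p : Int × (String × String)) : PvBuckets :=
  if p.2.2 == "=" then { s with eqs := s.eqs ++ [p.1] }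
  else if p.2.2 == "if" then { s with ifs := s.ifs ++ [p.1] }
  else if p.2.2 == "else" then { s with elses := s.elses ++ [p.1] }
  else if p.2.2 == "number" then { s with nums := s.nums ++ [p.2.1] }
  else if p.2.2 == "var_name" then { s with vars := s.vars ++ [p.2.1] }
  else if p.2.2 == "function_name" then { s with funs := s.funs ++ [p.2.1] }
  else s

def validate_L2_21_alt (statement_type : String) (tags_list : List (String × String)) : Bool :=
  let s := (PySem.List.enumerate tags_list 0).foldl pvStep ⟨[], [], [], [], [], []⟩
  statement_type == "conditional" &&
  s.eqs.length == 4 &&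
  (PySem.List.pyGetD s.eqs 1 0 - PySem.List.pyGetD s.eqs 0 0 == 1) &&
  (PySem.List.pyGetD s.eqs 3 0 - PySem.List.pyGetD s.eqs 2 0 == 1) &&
  s.nums == ["70", "421"] &&
  s.vars == ["turn", "turn"] &&
  s.funs == ["usefiroid", "usewateroid", "useelectroid"] &&
  s.ifs.length == 2 &&
  s.elses.length == 2 &&
  (PySem.List.pyGetD s.ifs 1 0 - PySem.List.pyGetD s.elses 0 0 == 1)

-- ===== PRECONDITION & SPEC =====
def Spec_validate_L2_21 (statement_type : String) (tags_list : List (String × String)) (out : Bool) : Prop := out = validate_L2_21_alt statement_type tags_list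
instance (statement_type : String) (tags_list : List (String × String)) (out : Bool) : Decidable (Spec_validate_L2_21 statement_type tags_list out) := by unfold Spec_validate_L2_21; infer_instance

-- ===== CLAIM (what is proved, stated in full; the proofs are below) =====
def Claim_equal_validate_L2_21 : Prop := ∀ (statement_type : String) (tags_list : List (String × String)), Dom_validate_L2_21 statement_type tags_list → Spec_validate_L2_21 statement_type tags_list (validate_L2_21 statement_type tags_list)

-- ===== LEMMAS AND PROOFS =====
theorem pv_fold_spec (L : List (Int × (String × String))) (s : PvBuckets) :
    L.foldl pvStep s =
      ⟨ s.eqs ++ (L.filter (fun p => p.2.2 == "=")).map (·.1),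
        s.ifs ++ (L.filter (fun p => p.2.2 == "if")).map (·.1),
        s.elses ++ (L.filter (fun p => p.2.2 == "else")).map (·.1),
        s.nums ++ (L.filter (fun p => p.2.2 == "number")).map (·.2.1),
        s.vars ++ (L.filter (fun p => p.2.2 == "var_name")).map (·.2.1),
        s.funs ++ (L.filter (fun p => p.2.2 == "function_name")).map (·.2.1)⟩ := by
  induction L generalizing s with
  | nil => simp
  | cons h t ih =>
    rw [List.foldl_cons, ih]
    unfold pvStep
    split_ifs with h1 h2 h3 h4 h5 h6 <;> simp_all

theorem pvIdxA_eq (tl : List (String × String)) (t : String) :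
    pvIdxA tl t = ((PySem.List.enumerate tl 0).filter (fun p => p.2.2 == t)).map (·.1) := by
  rw [PySem.List.enumerate_eq_map_pyRange tl ("", ""), List.filter_map, List.map_map]
  simp [pvIdxA, Function.comp_def]

theorem pvVal_eq (tl : List (String × String)) (t : String) :
    ((PySem.List.enumerate tl 0).filter (fun p => p.2.2 == t)).map (·.2.1)
      = (pvIdxA tl t).map (fun i => (PySem.List.pyGetD tl i ("", "")).1) := by
  rw [PySem.List.enumerate_eq_map_pyRange tl ("", ""), List.filter_map, List.map_map]
  simp [pvIdxA, Function.comp_def]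
set_option maxHeartbeats 2000000 in
theorem pv_main (st : String) (tl : List (String × String)) :
    validate_L2_21 st tl = validate_L2_21_alt st tl := by
  unfold validate_L2_21 validate_L2_21_alt
  rw [pv_fold_spec]
  simp only [List.nil_append, pvVal_eq, ← pvIdxA_eq]
  generalize pvIdxA tl "=" = E
  generalize pvIdxA tl "var_name" = V
  generalize pvIdxA tl "number" = N
  generalize pvIdxA tl "function_name" = F
  generalize pvIdxA tl "if" = I
  generalize pvIdxA tl "else" = L
  by_cases hst : st = "conditional"
  case neg => simp [hst]
  subst hst
  by_cases hE : E.length = 4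
  case neg => simp [hE]
  by_cases hI : I.length = 2
  case neg => simp [hI]
  by_cases hL : L.length = 2
  case neg => simp [hL]
  by_cases hV : V.length = 2
  case neg =>
    have hv : ¬ (V.map (fun i => (PySem.List.pyGetD tl i ("", "")).1) = ["turn", "turn"]) := by
      intro h; exact hV (by simpa using congrArg List.length h)
    simp [hV, hv]
  by_cases hN : N.length = 2
  case neg =>
    have hn : ¬ (N.map (fun i => (PySem.List.pyGetD tl i ("", "")).1) = ["70", "421"]) := by
      intro h; exact hN (by simpa using congrArg List.length h)
    simp [hN, hn]
  by_cases hF : F.length = 3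
  case neg =>
    have hf : ¬ (F.map (fun i => (PySem.List.pyGetD tl i ("", "")).1)
        = ["usefiroid", "usewateroid", "useelectroid"]) := by
      intro h; exact hF (by simpa using congrArg List.length h)
    simp [hF, hf]
  obtain ⟨e0, e1, e2, e3, rfl⟩ := List.length_eq_four.mp hE
  obtain ⟨v0, v1, rfl⟩ := List.length_eq_two.mp hV
  obtain ⟨n0, n1, rfl⟩ := List.length_eq_two.mp hN
  obtain ⟨f0, f1, f2, rfl⟩ := List.length_eq_three.mp hF
  obtain ⟨i0, i1, rfl⟩ := List.length_eq_two.mp hI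
  obtain ⟨l0, l1, rfl⟩ := List.length_eq_two.mp hL
  rw [Bool.eq_iff_iff]
  simp [pysem]
  tauto

-- ===== VERDICT (by name: the statement is the Claim_ definition above) =====
theorem validate_L2_21_spec : Claim_equal_validate_L2_21 := by
  intro st tl _
  unfold Spec_validate_L2_21
  exact pv_main st tl
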